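-- pv_equiv track=rewrite | github.com/deyuanyang92-dev/Temp_scripts | Mitoz-annotate/batch_mitoz.py | _split_meta_body
-- ===== SOURCE A (Python) =====
-- from typing import Dict, List, Optional, Tuple
--
-- def _split_meta_body(record: str) -> Tuple[str, str]:
--     lines = record.splitlines(keepends=True)
--     meta: List[str] = []
--     body: List[str] = []
--     in_body = False
--     for line in lines:
--         if not in_body and (line.startswith("FEATURES") or line.startswith("ORIGIN")):
--             in_body = True
--         (body if in_body else meta).append(line)
--     return "".join(meta), "".join(body)
-- ===== SOURCE B (Python) =====
-- def _split_meta_body(record):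
--     # Pointer scan over the raw string: walk line starts; at the first line start
--     # where FEATURES/ORIGIN begins, split the original string there by slicing.
--     # No line list is built and nothing is joined.
--     n = len(record)
--     p = 0
--     while p < n:
--         if record.startswith("FEATURES", p) or record.startswith("ORIGIN", p):
--             return record[:p], record[p:]
--         q = p
--         while q < n and record[q] != '\n' and record[q] != '\r':
--             q += 1
--         if q < n and record[q] == '\r' and q + 1 < n and record[q + 1] == '\n':
--             q += 1
--         p = q + 1
--     return record, ""
-- ===== Notes on version B (the rewrite author's own statement) =====
-- stated objective: alternative
-- what changed: Replaced A's splitlines + flag-driven dual-list accumulation + join by a pointer scan over the raw string that walks from line start to line start and splits the original string by slicing at the first FEATURES/ORIGIN line start.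
import Mathlib
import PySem

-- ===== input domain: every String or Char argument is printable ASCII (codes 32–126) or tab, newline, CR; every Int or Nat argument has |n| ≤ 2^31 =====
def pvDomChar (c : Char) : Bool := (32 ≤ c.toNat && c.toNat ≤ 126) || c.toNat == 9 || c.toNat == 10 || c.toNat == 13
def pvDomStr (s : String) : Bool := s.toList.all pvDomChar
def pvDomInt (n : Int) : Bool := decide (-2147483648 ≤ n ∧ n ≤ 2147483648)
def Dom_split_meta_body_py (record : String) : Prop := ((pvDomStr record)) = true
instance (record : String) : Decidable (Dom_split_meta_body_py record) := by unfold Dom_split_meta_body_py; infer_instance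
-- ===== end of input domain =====

-- B replaces A's splitlines + flag-driven dual accumulation + join by a pointer
-- scan over the raw string that slices at the first FEATURES/ORIGIN line start
-- (objective: alternative; same asymptotic cost).

-- Shared exact hand port of one step of str.splitlines(keepends=True):
-- take one line (with its ending) off the front; the only line breaks on
-- Dom_split_meta_body_py are '\n', '\r' and "\r\n", which this handles exactly.
def pvTakeLine : List Char → List Char × List Char
  | [] => ([], [])
  | c :: cs =>
      if c = '\n' then ([c], cs)
      else if c = '\x0d' then
        match cs with
        | '\n' :: cs' => ([c, '\n'], cs')
        | _ => ([c], cs)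
      else
        (c :: (pvTakeLine cs).1, (pvTakeLine cs).2)

-- needed for the termination of both ports
lemma pvTakeLine_len : ∀ l : List Char, l ≠ [] → (pvTakeLine l).2.length < l.length := by
  intro l
  induction l with
  | nil => simp
  | cons c cs ih =>
      intro _
      simp only [pvTakeLine]
      split_ifs with h1 h2
      · simp
      · cases cs with
        | nil => simp
        | cons d ds =>
            by_cases hd : d = '\n' <;> subst h2 <;> simp [hd]
      · cases cs with
        | nil => simp [pvTakeLine]
        | cons d ds =>
            have := ih (by simp)
            simp at this ⊢
            omega

-- ===== PORT A =====
-- record.splitlines(keepends=True), hand-ported (exact on the domain above)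
def pvSplitKeep : List Char → List (List Char)
  | [] => []
  | c :: cs =>
      (pvTakeLine (c :: cs)).1 :: pvSplitKeep (pvTakeLine (c :: cs)).2
termination_by l => l.length
decreasing_by
  exact pvTakeLine_len (c :: cs) (by simp)

-- line.startswith("FEATURES") or line.startswith("ORIGIN")
def pvStartsBody (line : List Char) : Bool :=
  PySem.Chars.startswith line "FEATURES".toList || PySem.Chars.startswith line "ORIGIN".toList

-- the body of A's for-loop: state = (meta, body, in_body)
def pvStepA (st : List (List Char) × List (List Char) × Bool) (line : List Char) :
    List (List Char) × List (List Char) × Bool :=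
  let inb := if !st.2.2 && pvStartsBody line then true else st.2.2
  if inb then (st.1, st.2.1 ++ [line], inb) else (st.1 ++ [line], st.2.1, inb)

-- "".join(strs) is ported as flattening the corresponding char lists (exact).
def split_meta_body_py (record : String) : String × String :=
  let lines := pvSplitKeep record.toList
  let st := lines.foldl pvStepA ([], [], false)
  (String.ofList st.1.flatten, String.ofList st.2.1.flatten)

-- ===== PORT B =====
-- B's outer while loop: acc holds the already-scanned meta prefix reversed;
-- rest is record[p:], always a line start.  B's inner skip-to-break-and-consume
-- step is exactly pvTakeLine (the shared hand port of one splitlines step).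
def pvGoB (acc rest : List Char) : List Char × List Char :=
  match rest with
  | [] => (acc.reverse, [])
  | c :: cs =>
      if PySem.Chars.startswith (c :: cs) "FEATURES".toList
          || PySem.Chars.startswith (c :: cs) "ORIGIN".toList then
        (acc.reverse, c :: cs)
      else
        pvGoB ((pvTakeLine (c :: cs)).1.reverse ++ acc) (pvTakeLine (c :: cs)).2
termination_by rest.length
decreasing_by
  exact pvTakeLine_len (c :: cs) (by simp)

def split_meta_body_py_alt (record : String) : String × String :=
  let mb := pvGoB [] record.toList
  (String.ofList mb.1, String.ofList mb.2)

-- ===== PRECONDITION & SPEC =====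
def Spec_split_meta_body_py (record : String) (out : String × String) : Prop := out = split_meta_body_py_alt record
instance (record : String) (out : String × String) : Decidable (Spec_split_meta_body_py record out) := by unfold Spec_split_meta_body_py; infer_instance

-- ===== CLAIM (what is proved, stated in full; the proofs are below) =====
def Claim_equal_split_meta_body_py : Prop := ∀ (record : String), Dom_split_meta_body_py record → Spec_split_meta_body_py record (split_meta_body_py record)

-- ===== LEMMAS AND PROOFS =====

-- one splitlines step reconstructs its input
lemma takeLine_append : ∀ l : List Char, (pvTakeLine l).1 ++ (pvTakeLine l).2 = l := by
  intro l
  induction l with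
  | nil => simp [pvTakeLine]
  | cons c cs ih =>
      simp only [pvTakeLine]
      split_ifs with h1 h2
      · simp
      · cases cs with
        | nil => simp
        | cons d ds => by_cases hd : d = '\n' <;> simp [hd]
      · simpa using ih

-- splitlines(keepends=True) reconstructs the string
lemma splitKeep_flatten : ∀ (n : Nat) (l : List Char), l.length ≤ n → (pvSplitKeep l).flatten = l := by
  intro n
  induction n with
  | zero =>
      intro l h
      have hl : l = [] := List.length_eq_zero_iff.mp (Nat.le_zero.mp h)
      subst hl; simp [pvSplitKeep]
  | succ n ih =>
      intro l h
      cases l with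
      | nil => simp [pvSplitKeep]
      | cons c cs =>
          have hrec : (pvTakeLine (c :: cs)).2.length ≤ n := by
            have := pvTakeLine_len (c :: cs) (by simp)
            simp only [List.length_cons] at this h; omega
          rw [pvSplitKeep, List.flatten_cons, ih _ hrec, takeLine_append]

-- a break-free pattern is a prefix of the first line iff it is one of the raw string
lemma starts_takeLine (pat : List Char) (hp : ∀ c ∈ pat, c ≠ '\n' ∧ c ≠ '\x0d') :
    ∀ l : List Char, (pat <+: (pvTakeLine l).1 ↔ pat <+: l) := by
  induction pat with
  | nil => intro l; simp
  | cons p ps ih =>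
      intro l
      have hp0 := hp p (by simp)
      cases l with
      | nil => exact Iff.rfl
      | cons c cs =>
          simp only [pvTakeLine]
          split_ifs with h1 h2
          · subst h1
            constructor <;> (intro h; rcases List.cons_prefix_cons.mp h with ⟨rfl, _⟩; exact absurd rfl hp0.1)
          · subst h2
            cases cs with
            | nil =>
                constructor <;> (intro h; rcases List.cons_prefix_cons.mp h with ⟨rfl, _⟩; exact absurd rfl hp0.2)
            | cons d ds =>
                split <;>
                  (constructor <;> (intro h; rcases List.cons_prefix_cons.mp h with ⟨rfl, _⟩; exact absurd rfl hp0.2))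
          · rw [List.cons_prefix_cons, List.cons_prefix_cons,
              ih (fun x hx => hp x (by simp [hx]))]

lemma featNoBreak : ∀ c ∈ "FEATURES".toList, c ≠ '\n' ∧ c ≠ '\x0d' := by
  intro c hc; simp at hc
  rcases hc with rfl | rfl | rfl | rfl | rfl | rfl | rfl | rfl <;> exact ⟨by decide, by decide⟩

lemma origNoBreak : ∀ c ∈ "ORIGIN".toList, c ≠ '\n' ∧ c ≠ '\x0d' := by
  intro c hc; simp at hc
  rcases hc with rfl | rfl | rfl | rfl | rfl | rfl <;> exact ⟨by decide, by decide⟩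

-- once in_body is true, every remaining line goes to body
lemma foldA_true (ls : List (List Char)) : ∀ m b,
    List.foldl pvStepA (m, b, true) ls = (m, b ++ ls, true) := by
  induction ls with
  | nil => intro m b; simp
  | cons l ls ih =>
      intro m b
      simp only [List.foldl_cons, pvStepA]
      simpa using ih m (b ++ [l])

-- starting meta lines only shift A's loop result
lemma foldA_shift (ls : List (List Char)) : ∀ m,
    List.foldl pvStepA (m, [], false) ls
      = (m ++ (List.foldl pvStepA ([], [], false) ls).1,
         (List.foldl pvStepA ([], [], false) ls).2.1,
         (List.foldl pvStepA ([], [], false) ls).2.2) := by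
  induction ls with
  | nil => intro m; simp
  | cons l ls ih =>
      intro m
      by_cases h : pvStartsBody l = true
      · have hs : ∀ m' : List (List Char), pvStepA (m', [], false) l = (m', [l], true) := by
          intro m'; simp [pvStepA, h]
        simp only [List.foldl_cons, hs, foldA_true]
        simp
      · have hs : ∀ m' : List (List Char), pvStepA (m', [], false) l = (m' ++ [l], [], false) := by
          intro m'; simp [pvStepA, h]
        simp only [List.foldl_cons, hs, ih (m ++ [l]), ih ([] ++ [l])]
        simp

-- B's scan computes exactly A's loop result, flattened
lemma goB_eq : ∀ (n : Nat) (rest : List Char), rest.length ≤ n → ∀ acc,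
    pvGoB acc rest =
      (acc.reverse ++ (List.foldl pvStepA ([], [], false) (pvSplitKeep rest)).1.flatten,
       (List.foldl pvStepA ([], [], false) (pvSplitKeep rest)).2.1.flatten) := by
  intro n
  induction n with
  | zero =>
      intro rest h acc
      have hl : rest = [] := List.length_eq_zero_iff.mp (Nat.le_zero.mp h)
      subst hl; simp [pvGoB, pvSplitKeep]
  | succ n ih =>
      intro rest h acc
      cases rest with
      | nil => simp [pvGoB, pvSplitKeep]
      | cons c cs =>
          have hrec : (pvTakeLine (c :: cs)).2.length ≤ n := by
            have := pvTakeLine_len (c :: cs) (by simp)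
            simp only [List.length_cons] at this h; omega
          have hF : PySem.Chars.startswith (pvTakeLine (c :: cs)).1 "FEATURES".toList
              = PySem.Chars.startswith (c :: cs) "FEATURES".toList := by
            rw [Bool.eq_iff_iff, PySem.Chars.startswith_iff, PySem.Chars.startswith_iff]
            exact starts_takeLine _ featNoBreak _
          have hO : PySem.Chars.startswith (pvTakeLine (c :: cs)).1 "ORIGIN".toList
              = PySem.Chars.startswith (c :: cs) "ORIGIN".toList := by
            rw [Bool.eq_iff_iff, PySem.Chars.startswith_iff, PySem.Chars.startswith_iff]
            exact starts_takeLine _ origNoBreak _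
          have hline : pvStartsBody (pvTakeLine (c :: cs)).1
              = (PySem.Chars.startswith (c :: cs) "FEATURES".toList
                  || PySem.Chars.startswith (c :: cs) "ORIGIN".toList) := by
            rw [pvStartsBody, hF, hO]
          rw [pvGoB, pvSplitKeep, List.foldl_cons]
          cases hcond : (PySem.Chars.startswith (c :: cs) "FEATURES".toList
              || PySem.Chars.startswith (c :: cs) "ORIGIN".toList) with
          | true =>
              have hstep : pvStepA ([], [], false) (pvTakeLine (c :: cs)).1
                  = ([], [(pvTakeLine (c :: cs)).1], true) := by
                have hsb : pvStartsBody (pvTakeLine (c :: cs)).1 = true := by rw [hline]; exact hcond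
                simp [pvStepA, hsb]
              simp only [hstep, foldA_true, if_true]
              simp [splitKeep_flatten _ _ hrec, takeLine_append]
          | false =>
              have hstep : pvStepA ([], [], false) (pvTakeLine (c :: cs)).1
                  = ([(pvTakeLine (c :: cs)).1], [], false) := by
                have hsb : pvStartsBody (pvTakeLine (c :: cs)).1 = false := by rw [hline]; exact hcond
                simp [pvStepA, hsb]
              simp only [hstep]
              rw [foldA_shift, ih _ hrec]
              simp

-- ===== VERDICT (by name: the statement is the Claim_ definition above) =====
theorem split_meta_body_py_spec : Claim_equal_split_meta_body_py := by
  intro record _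
  unfold Spec_split_meta_body_py split_meta_body_py split_meta_body_py_alt
  rw [goB_eq record.toList.length record.toList le_rfl []]
  simp
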